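-- pv_equiv track=rewrite | github.com/cjcool11/Python-Course | powerof8project.py | is_power_of_8
-- ===== SOURCE A (Python) =====
-- def is_power_of_8(n):
--     if n <= 0:
--         return False
--     if (n & (n - 1)) != 0:
--         return False
--     position = 0
--     while n > 1:
--         n >>= 1
--         position += 1
--     return position % 3 == 0
-- ===== SOURCE B (Python) =====
-- def is_power_of_8(n):
--     if n <= 0:
--         return False
--     while n % 8 == 0:
--         n //= 8
--     return n == 1
-- ===== Notes on version B (the rewrite author's own statement) =====
-- stated objective: simpler
-- what changed: B replaces the power-of-two bit test plus a bit-shift position-counting loop (checking position % 3 == 0) with a single loop that divides out factors of 8 and checks the remainder equals 1.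
import Mathlib
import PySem

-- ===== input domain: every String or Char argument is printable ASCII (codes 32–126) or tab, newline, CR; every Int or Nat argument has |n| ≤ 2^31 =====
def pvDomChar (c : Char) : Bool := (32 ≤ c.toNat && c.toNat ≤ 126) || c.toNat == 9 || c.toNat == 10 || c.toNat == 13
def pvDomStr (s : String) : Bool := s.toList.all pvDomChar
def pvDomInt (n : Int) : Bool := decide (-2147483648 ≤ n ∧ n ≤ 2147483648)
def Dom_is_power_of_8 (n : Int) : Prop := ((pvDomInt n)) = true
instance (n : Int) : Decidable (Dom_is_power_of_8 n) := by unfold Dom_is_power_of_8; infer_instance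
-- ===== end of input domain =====

-- B replaces A's power-of-two bit test + shift-counting loop (position % 3 == 0) with a
-- single loop dividing out factors of 8 and checking the remainder is 1 (objective: simpler).

-- ===== PORT A =====
-- the while loop: while n > 1: n >>= 1; position += 1
def pvShiftLoop (n : Int) (position : Int) : Int :=
  if 1 < n then pvShiftLoop (n >>> (1 : Nat)) (position + 1) else position
termination_by n.toNat
decreasing_by
  have h2 : n >>> (1 : Nat) = n / 2 := by
    simp [Int.shiftRight_eq_div_pow]
  omega

def is_power_of_8 (n : Int) : Bool :=
  if n ≤ 0 then false
  else if PySem.Int.band n (n - 1) ≠ 0 then false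
  else decide (PySem.Int.mod (pvShiftLoop n 0) 3 = 0)

-- ===== PORT B =====
-- the while loop: while n % 8 == 0: n //= 8.  The extra conjunct '1 < n' only serves
-- termination; it is implied by the loop condition on every reached input (n ≥ 1 and 8 ∣ n).
def pvDiv8Loop (n : Int) : Int :=
  if PySem.Int.mod n 8 = 0 ∧ 1 < n then pvDiv8Loop (PySem.Int.floordiv n 8) else n
termination_by n.toNat
decreasing_by
  rename_i h
  have hd : PySem.Int.floordiv n 8 = n / 8 := PySem.Int.floordiv_eq_ediv_of_pos (by omega)
  omega

def is_power_of_8_alt (n : Int) : Bool :=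
  if n ≤ 0 then false
  else decide (pvDiv8Loop n = 1)

-- ===== PRECONDITION & SPEC =====
def Spec_is_power_of_8 (n : Int) (out : Bool) : Prop := out = is_power_of_8_alt n
instance (n : Int) (out : Bool) : Decidable (Spec_is_power_of_8 n out) := by unfold Spec_is_power_of_8; infer_instance

-- ===== CLAIM (what is proved, stated in full; the proofs are below) =====
def Claim_equal_is_power_of_8 : Prop := ∀ (n : Int), Dom_is_power_of_8 n → Spec_is_power_of_8 n (is_power_of_8 n)

-- ===== LEMMAS AND PROOFS =====

-- The hard direction of A's bit test: m & (m-1) = 0 on positive m forces a power of two.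
theorem pv_nat_and_pred_pow (m : Nat) (hm : 0 < m) (h : m &&& (m - 1) = 0) :
    ∃ p : Nat, m = 2 ^ p := by
  induction m using Nat.strong_induction_on with
  | _ m IH =>
  have H : ∀ i, (m.testBit i && (m - 1).testBit i) = false := by
    intro i
    rw [← Nat.testBit_and, h, Nat.zero_testBit]
  by_cases h1 : m = 1
  · exact ⟨0, by simp [h1]⟩
  · have hm2 : 2 ≤ m := by omega
    by_cases he : m % 2 = 0
    · -- even: the bit test descends to m / 2
      have hhalf : ∀ i, ((m / 2).testBit i && (m / 2 - 1).testBit i) = false := by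
        intro i
        have hb1 : m.testBit (i + 1) = (m / 2).testBit i := by
          rw [Nat.testBit_add_one]
        have hb2 : (m - 1).testBit (i + 1) = (m / 2 - 1).testBit i := by
          rw [Nat.testBit_add_one]
          congr 1
          omega
        have := H (i + 1)
        rw [hb1, hb2] at this
        exact this
      have hz : (m / 2) &&& (m / 2 - 1) = 0 := by
        apply Nat.eq_of_testBit_eq
        intro i
        rw [Nat.testBit_and, Nat.zero_testBit, hhalf]
      obtain ⟨p, hp⟩ := IH (m / 2) (by omega) (by omega) hz
      exact ⟨p + 1, by rw [pow_succ]; omega⟩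
    · -- odd and ≥ 3: impossible, all higher bits of m must vanish
      exfalso
      have hz : m / 2 = 0 := by
        apply Nat.eq_of_testBit_eq
        intro i
        rw [Nat.zero_testBit]
        have hb1 : m.testBit (i + 1) = (m / 2).testBit i := by
          rw [Nat.testBit_add_one]
        have hb2 : (m - 1).testBit (i + 1) = (m / 2).testBit i := by
          rw [Nat.testBit_add_one]
          congr 1
          omega
        have := H (i + 1)
        rw [hb1, hb2, Bool.and_self] at this
        exact this
      omega

theorem pv_band_pred_pow (n : Int) (hn : 0 < n) (h : PySem.Int.band n (n - 1) = 0) :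
    ∃ p : Nat, n = 2 ^ p := by
  rw [PySem.Int.band_of_nonneg (by omega) (by omega)] at h
  have h0 : n.toNat &&& (n - 1).toNat = 0 := by exact_mod_cast h
  have h1 : (n - 1).toNat = n.toNat - 1 := by omega
  rw [h1] at h0
  obtain ⟨p, hp⟩ := pv_nat_and_pred_pow n.toNat (by omega) h0
  refine ⟨p, ?_⟩
  have : (n.toNat : Int) = ((2 ^ p : Nat) : Int) := by exact_mod_cast hp
  push_cast at this
  omega

-- A's bit test passes on powers of two.
theorem pv_band_pow2 (p : Nat) : PySem.Int.band ((2 : Int) ^ p) ((2 : Int) ^ p - 1) = 0 := by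
  rw [PySem.Int.band_of_nonneg (by positivity) (by have : (1:Int) ≤ 2 ^ p := one_le_pow₀ (by norm_num); omega)]
  have ht : ((2:Int) ^ p).toNat = 2 ^ p := by
    have : ((2:Int) ^ p) = ((2 ^ p : Nat) : Int) := by push_cast; ring
    rw [this]; exact Int.toNat_natCast _
  have ht1 : ((2:Int) ^ p - 1).toNat = 2 ^ p - 1 := by
    have : (1:Int) ≤ 2 ^ p := one_le_pow₀ (by norm_num)
    omega
  rw [ht, ht1, Nat.and_two_pow_sub_one_eq_mod]
  simp

-- A's shift loop counts the exponent.
theorem pv_shiftLoop_pow (p : Nat) : ∀ acc : Int, pvShiftLoop ((2 : Int) ^ p) acc = acc + p := by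
  induction p with
  | zero => intro acc; rw [pvShiftLoop]; norm_num
  | succ p IH =>
    intro acc
    rw [pvShiftLoop]
    have hgt : (1 : Int) < 2 ^ (p + 1) := by
      calc (1:Int) < 2 := by norm_num
      _ ≤ 2 ^ (p+1) := le_self_pow₀ (by norm_num) (by omega)
    have hs : ((2 : Int) ^ (p + 1)) >>> (1 : Nat) = 2 ^ p := by
      rw [Int.shiftRight_eq_div_pow]
      rw [pow_succ, pow_one]
      norm_num
    rw [if_pos hgt, hs, IH]
    push_cast; ring

-- B's loop on a power of two leaves 2^(p % 3).
theorem pv_div8Loop_pow (p : Nat) : pvDiv8Loop ((2 : Int) ^ p) = 2 ^ (p % 3) := by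
  induction p using Nat.strong_induction_on with
  | _ p IH =>
  by_cases h3 : 3 ≤ p
  · rw [pvDiv8Loop]
    have hdvd : (8 : Int) ∣ 2 ^ p := by
      have : (8 : Int) = 2 ^ 3 := by norm_num
      rw [this]
      exact pow_dvd_pow 2 h3
    have hmod : PySem.Int.mod ((2:Int) ^ p) 8 = 0 := (PySem.Int.mod_eq_zero_iff_dvd _ _).mpr hdvd
    have hgt : (1 : Int) < 2 ^ p := by
      calc (1:Int) < 2 := by norm_num
      _ ≤ 2 ^ p := le_self_pow₀ (by norm_num) (by omega)
    have hfd : PySem.Int.floordiv ((2:Int) ^ p) 8 = 2 ^ (p - 3) := by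
      rw [PySem.Int.floordiv_eq_ediv_of_pos (by norm_num)]
      have : (2:Int) ^ p = 2 ^ (p - 3) * 8 := by
        have h8 : (8:Int) = 2 ^ 3 := by norm_num
        rw [h8, ← pow_add]
        congr 1; omega
      rw [this]
      exact Int.mul_ediv_cancel _ (by norm_num)
    rw [if_pos ⟨hmod, hgt⟩, hfd, IH (p - 3) (by omega)]
    congr 1; omega
  · interval_cases p <;> (rw [pvDiv8Loop]; decide)

-- B's loop returning 1 forces a power of 8.
theorem pv_div8Loop_eq_one_aux : ∀ (m : Nat) (n : Int), n.toNat = m → 0 < n →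
    pvDiv8Loop n = 1 → ∃ k : Nat, n = 8 ^ k := by
  intro m
  induction m using Nat.strong_induction_on with
  | _ m IH =>
  intro n hm hn h
  rw [pvDiv8Loop] at h
  by_cases hc : PySem.Int.mod n 8 = 0 ∧ 1 < n
  · rw [if_pos hc] at h
    obtain ⟨q, hq⟩ := (PySem.Int.mod_eq_zero_iff_dvd _ _).mp hc.1
    have hfd : PySem.Int.floordiv n 8 = n / 8 := PySem.Int.floordiv_eq_ediv_of_pos (by omega)
    have hq8 : n / 8 = q := by rw [hq]; exact Int.mul_ediv_cancel_left _ (by norm_num)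
    obtain ⟨k, hk⟩ := IH (n / 8).toNat (by omega) (n / 8) rfl (by omega) (hfd ▸ h)
    have hqk : q = 8 ^ k := by rw [← hq8, hk]
    exact ⟨k + 1, by rw [hq, hqk, pow_succ, mul_comm]⟩
  · rw [if_neg hc] at h
    exact ⟨0, by simp [h]⟩

theorem pv_div8Loop_eq_one (n : Int) (hn : 0 < n) (h : pvDiv8Loop n = 1) :
    ∃ k : Nat, n = 8 ^ k :=
  pv_div8Loop_eq_one_aux n.toNat n rfl hn h

-- ===== VERDICT (by name: the statement is the Claim_ definition above) =====
theorem is_power_of_8_spec : Claim_equal_is_power_of_8 := by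
  intro n _
  unfold Spec_is_power_of_8 is_power_of_8 is_power_of_8_alt
  by_cases hle : n ≤ 0
  · simp [hle]
  · have hn : 0 < n := by omega
    simp only [hle, if_false]
    by_cases hb : PySem.Int.band n (n - 1) = 0
    · obtain ⟨p, rfl⟩ := pv_band_pred_pow n hn hb
      simp only [hb, ne_eq, not_true_eq_false, if_false]
      rw [pv_shiftLoop_pow p 0, pv_div8Loop_pow p]
      have hmod : PySem.Int.mod ((0 : Int) + (p : Int)) 3 = ((p % 3 : Nat) : Int) := by
        rw [zero_add]
        exact_mod_cast PySem.Int.mod_natCast p 3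
      rw [hmod]
      have h3 : p % 3 = 0 ∨ p % 3 = 1 ∨ p % 3 = 2 := by omega
      rcases h3 with h | h | h <;> simp [h]
    · simp only [hb, ne_eq, not_false_eq_true, if_true]
      have : pvDiv8Loop n ≠ 1 := by
        intro h1
        obtain ⟨k, hk⟩ := pv_div8Loop_eq_one n hn h1
        have h8 : (8 : Int) ^ k = 2 ^ (3 * k) := by
          rw [pow_mul]; norm_num
        exact hb (hk ▸ h8 ▸ pv_band_pow2 (3 * k))
      simp [this]
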